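-- pv_equiv track=rewrite | github.com/EvandroRBR/Tratamento-de-dados-SPC | src/engine/relatorio.py | contRepetidos
-- ===== SOURCE A (Python) =====
-- def contRepetidos(var):
--     cont = 0
--     unico = 0
--     for i in var:
--         if var.count(i) != 1:
--             cont += 1
--         else:
--             unico += 1
--     contVazios = var.count("empty:''")
--     contDuplicados = cont - contVazios
--
--     return [ unico, contDuplicados, contVazios ]
-- ===== SOURCE B (Python) =====
-- def contRepetidos(var):
--     s = sorted(var)
--     n = len(s)
--     unico = 0
--     cont = 0
--     contVazios = 0
--     i = 0
--     while i < n: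
--         j = i + 1
--         while j < n and s[j] == s[i]:
--             j += 1
--         run = j - i
--         if run == 1:
--             unico += 1
--         else:
--             cont += run
--         if s[i] == "empty:''":
--             contVazios = run
--         i = j
--     return [unico, cont - contVazios, contVazios]
-- ===== Notes on version B (the rewrite author's own statement) =====
-- stated objective: faster
-- what changed: A rescans the whole list with var.count for every element; B sorts a copy once and walks it in a single run-length pass over maximal runs of equal adjacent elements, deriving unico/cont/contVazios from the run lengths.
import Mathlib
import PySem

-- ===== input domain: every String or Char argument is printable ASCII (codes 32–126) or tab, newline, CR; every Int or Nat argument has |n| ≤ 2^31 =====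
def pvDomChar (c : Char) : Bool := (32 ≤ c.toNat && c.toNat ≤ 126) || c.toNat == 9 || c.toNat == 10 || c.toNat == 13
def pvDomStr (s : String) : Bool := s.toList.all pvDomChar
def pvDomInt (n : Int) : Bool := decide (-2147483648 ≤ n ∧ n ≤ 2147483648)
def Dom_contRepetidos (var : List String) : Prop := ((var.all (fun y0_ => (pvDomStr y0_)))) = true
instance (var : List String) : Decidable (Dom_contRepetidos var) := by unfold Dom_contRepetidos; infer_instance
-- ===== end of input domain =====

-- B sorts a copy of the list once and derives all three counters from one run-length pass
-- over maximal runs of equal adjacent elements, instead of A's var.count scan per element.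

-- ===== PORT A =====
def contRepetidos (var : List String) : List Int :=
  let r := var.foldl
    (fun (p : Int × Int) i =>
      if PySem.List.count var i ≠ 1 then (p.1 + 1, p.2) else (p.1, p.2 + 1))
    (0, 0)
  let contVazios : Int := (PySem.List.count var "empty:''" : Int)
  let contDuplicados := r.1 - contVazios
  [r.2, contDuplicados, contVazios]

-- ===== PORT B =====
-- the outer 'while i < n' loop of Source B; the inner 'while j < n and s[j] == s[i]' scan of the
-- rest of the current run is takeWhile/dropWhile of the remainder (exact), run = j - i
def runScan (l : List String) (unico cont contVazios : Int) : List Int :=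
  match l with
  | [] => [unico, cont - contVazios, contVazios]
  | x :: rest =>
    let run : Int := 1 + ((rest.takeWhile (fun y => y == x)).length : Int)
    runScan (rest.dropWhile (fun y => y == x))
      (if run == 1 then unico + 1 else unico)
      (if run == 1 then cont else cont + run)
      (if x == "empty:''" then run else contVazios)
termination_by l.length
decreasing_by
  have := List.length_dropWhile_le (fun y => y == x) rest
  simp
  omega

def contRepetidos_alt (var : List String) : List Int :=
  runScan (PySem.List.sorted var (fun x => x) false) 0 0 0

-- ===== PRECONDITION & SPEC =====
def Spec_contRepetidos (var : List String) (out : List Int) : Prop := out = contRepetidos_alt var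
instance (var : List String) (out : List Int) : Decidable (Spec_contRepetidos var out) := by unfold Spec_contRepetidos; infer_instance

-- ===== CLAIM (what is proved, stated in full; the proofs are below) =====
def Claim_equal_contRepetidos : Prop := ∀ (var : List String), Dom_contRepetidos var → Spec_contRepetidos var (contRepetidos var)

-- ===== LEMMAS AND PROOFS =====

-- A's fold, split into its two accumulators, is a pair of occurrence counts.
theorem A_counts (var : List String) :
    contRepetidos var =
      [((var.countP (fun i => List.count i var == 1) : Nat) : Int),
       ((var.countP (fun i => !(List.count i var == 1)) : Nat) : Int) -
         ((List.count "empty:''" var : Nat) : Int),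
       ((List.count "empty:''" var : Nat) : Int)] := by
  unfold contRepetidos
  rw [show (fun (p : Int × Int) i =>
        if PySem.List.count var i ≠ 1 then (p.1 + 1, p.2) else (p.1, p.2 + 1))
      = fun (p : Int × Int) i =>
        ((fun a i => if PySem.List.count var i ≠ 1 then a + 1 else a) p.1 i,
         (fun a i => if PySem.List.count var i = 1 then a + 1 else a) p.2 i) from by
    funext p i
    simp only [PySem.List.count_eq]
    by_cases h : List.count i var = 1 <;> simp [h]]
  rw [PySem.List.foldl_prod_mk
    (fun a i => if PySem.List.count var i ≠ 1 then a + 1 else a)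
    (fun a i => if PySem.List.count var i = 1 then a + 1 else a)]
  rw [PySem.List.foldl_ite_add_one (fun i => PySem.List.count var i ≠ 1) var 0]
  rw [PySem.List.foldl_ite_add_one (fun i => PySem.List.count var i = 1) var 0]
  simp only [PySem.List.count_eq, zero_add]
  simp only [List.cons.injEq, and_true]
  refine ⟨by congr 1, ?_⟩
  congr 2
  exact List.countP_congr (fun a _ => by by_cases h : List.count a var = 1 <;> simp [h])

-- On a ≤-sorted list the run scan computes exactly the three counts.
theorem runScan_sorted (n : Nat) : ∀ (l : List String), l.length ≤ n →
    l.Pairwise (fun a b => a ≤ b) → ∀ u c v : Int,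
    runScan l u c v =
      [u + ((l.countP (fun i => List.count i l == 1) : Nat) : Int),
       (c + ((l.countP (fun i => !(List.count i l == 1)) : Nat) : Int)) -
         (if "empty:''" ∈ l then ((List.count "empty:''" l : Nat) : Int) else v),
       if "empty:''" ∈ l then ((List.count "empty:''" l : Nat) : Int) else v] := by
  induction n with
  | zero =>
    intro l hl _ u c v
    have hnil : l = [] := List.eq_nil_of_length_eq_zero (Nat.le_zero.mp hl)
    subst hnil
    simp [runScan]
  | succ n ih =>
    intro l hl hp u c v
    match l with
    | [] => simp [runScan]
    | x :: rest =>
      rw [runScan]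
      set t := rest.takeWhile (fun y => y == x) with htdef
      set d := rest.dropWhile (fun y => y == x) with hddef
      have hrest : t ++ d = rest := List.takeWhile_append_dropWhile
      have ht : ∀ y ∈ t, y = x := by
        intro y hy
        rw [htdef] at hy
        have hpy := List.mem_takeWhile_imp hy
        exact eq_of_beq (by simpa using hpy)
      have hxle : ∀ y ∈ rest, x ≤ y := (List.pairwise_cons.mp hp).1
      have hdpair : d.Pairwise (fun a b => a ≤ b) :=
        List.Pairwise.sublist (List.dropWhile_sublist _) (List.pairwise_cons.mp hp).2
      have hxd : ∀ y ∈ d, y ≠ x := by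
        cases hdd : d with
        | nil => simp
        | cons z d' =>
          have hznil : rest.dropWhile (fun y => y == x) ≠ [] := by
            rw [← hddef, hdd]; simp
          have hz := List.head_dropWhile_not (fun y => y == x) hznil
          have hhead : (rest.dropWhile (fun y => y == x)).head hznil = z := by
            have := hddef ▸ hdd
            simp [this]
          rw [hhead] at hz
          have hzx : z ≠ x := by simpa using hz
          have hzmem : z ∈ rest := by
            have hzd : z ∈ d := by rw [hdd]; exact List.mem_cons_self
            exact (List.dropWhile_sublist _).subset (hddef ▸ hzd)
          have hxz : x < z := lt_of_le_of_ne (hxle z hzmem) (fun h => hzx h.symm)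
          intro y hy
          rcases List.mem_cons.mp hy with h | h
          · subst h; exact hzx
          · have hzy : z ≤ y := (List.pairwise_cons.mp (hdd ▸ hdpair)).1 y h
            intro hyx
            subst hyx
            exact absurd (lt_of_lt_of_le hxz hzy) (lt_irrefl y)
      have hdlen : d.length ≤ n := by
        have h1 : d.length ≤ rest.length := hddef ▸ List.length_dropWhile_le _ _
        have h2 : rest.length + 1 ≤ n + 1 := by simpa using hl
        omega
      -- count facts
      have hcx : List.count x (x :: rest) = 1 + t.length := by
        rw [← hrest]
        have h1 : List.count x t = t.length :=
          List.count_eq_length.mpr (fun b hb => by rw [ht b hb])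
        have h2 : List.count x d = 0 :=
          List.count_eq_zero.mpr (fun hx => hxd x hx rfl)
        simp [List.count_append, h1, h2]
        omega
      have hcy : ∀ y, y ≠ x → List.count y (x :: rest) = List.count y d := by
        intro y hy
        rw [← hrest]
        have h1 : List.count y t = 0 :=
          List.count_eq_zero.mpr (fun hyt => hy (ht y hyt))
        simp [List.count_append, h1, Ne.symm hy]
      have hsplit : ∀ (p : String → Bool),
          List.countP p (x :: rest) =
            (if p x then 1 else 0) + List.countP p t + List.countP p d := by
        intro p
        rw [← hrest]
        simp [List.countP_append, List.countP_cons]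
        omega
      have hPt : ∀ (p : String → Bool),
          List.countP p t = if p x then t.length else 0 := by
        intro p
        by_cases hpx : p x = true
        · rw [if_pos hpx]
          exact List.countP_eq_length.mpr (fun a ha => (ht a ha) ▸ hpx)
        · rw [if_neg hpx]
          exact List.countP_eq_zero.mpr (fun a ha => (ht a ha) ▸ hpx)
      have hPd1 : List.countP (fun i => List.count i (x :: rest) == 1) d
          = List.countP (fun i => List.count i d == 1) d :=
        List.countP_congr (fun a ha => by rw [hcy a (hxd a ha)])
      have hPd2 : List.countP (fun i => !(List.count i (x :: rest) == 1)) d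
          = List.countP (fun i => !(List.count i d == 1)) d :=
        List.countP_congr (fun a ha => by rw [hcy a (hxd a ha)])
      rw [ih d hdlen hdpair]
      simp only [List.cons.injEq, and_true]
      -- the common contVazios value
      have hvaz : (if "empty:''" ∈ d then ((List.count "empty:''" d : Nat) : Int)
            else (if (x == "empty:''") = true
              then 1 + ((t.length : Nat) : Int) else v))
          = (if "empty:''" ∈ x :: rest then ((List.count "empty:''" (x :: rest) : Nat) : Int) else v) := by
        by_cases hxe : x = "empty:''"
        · subst hxe
          have hnd : "empty:''" ∉ d := fun h => hxd _ h rfl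
          rw [if_neg hnd, if_pos List.mem_cons_self, if_pos (by simp), hcx]
          push_cast
          ring
        · have h1 : ("empty:''" ∈ x :: rest) ↔ ("empty:''" ∈ d) := by
            constructor
            · intro h
              rcases List.mem_cons.mp h with h | h
              · exact absurd h.symm hxe
              · rw [← hrest] at h
                rcases List.mem_append.mp h with h | h
                · exact absurd (ht _ h) (fun he => hxe he.symm)
                · exact h
            · intro h
              exact List.mem_cons_of_mem _ ((hddef ▸ List.dropWhile_sublist (l := rest) (p := fun y => y == x)).subset h)
          have h2 : (x == "empty:''") = false := by simpa using hxe
          by_cases hmem : "empty:''" ∈ d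
          · rw [if_pos hmem, if_pos (h1.mpr hmem), hcy _ (Ne.symm hxe)]
          · rw [if_neg hmem, if_neg (fun h => hmem (h1.mp h)), h2]
            simp
      refine ⟨?_, ?_, hvaz⟩
      · -- unico component
        rw [hsplit, hPt, hPd1]
        by_cases htnil : t = []
        · have hrun : ((1 + ((t.length : Nat) : Int)) == 1) = true := by
            simp [htnil]
          have hone : ((List.count x (x :: rest)) == 1) = true := by
            rw [hcx, htnil]; simp
          rw [hrun, hone]
          simp [htnil]
          ring
        · have hlen : 0 < t.length := List.length_pos_iff.mpr htnil
          have hrun : ((1 + ((t.length : Nat) : Int)) == 1) = false := by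
            simp; omega
          have hone : ((List.count x (x :: rest)) == 1) = false := by
            rw [hcx]; simp; omega
          rw [hrun, hone]
          simp
      · -- duplicados component
        rw [hvaz]
        congr 1
        rw [hsplit, hPt, hPd2]
        by_cases htnil : t = []
        · have hrun : ((1 + ((t.length : Nat) : Int)) == 1) = true := by
            simp [htnil]
          have hone : (!((List.count x (x :: rest)) == 1)) = false := by
            rw [hcx, htnil]; simp
          rw [hrun, hone]
          simp
        · have hlen : 0 < t.length := List.length_pos_iff.mpr htnil
          have hrun : ((1 + ((t.length : Nat) : Int)) == 1) = false := by
            simp; omega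
          have hone : (!((List.count x (x :: rest)) == 1)) = true := by
            rw [hcx]; simp; omega
          rw [hrun, hone]
          simp
          ring
-- B equals the same three counts, via the sorted permutation.
theorem B_counts (var : List String) :
    contRepetidos_alt var =
      [((var.countP (fun i => List.count i var == 1) : Nat) : Int),
       ((var.countP (fun i => !(List.count i var == 1)) : Nat) : Int) -
         ((List.count "empty:''" var : Nat) : Int),
       ((List.count "empty:''" var : Nat) : Int)] := by
  unfold contRepetidos_alt
  have hperm := PySem.List.sorted_perm var (fun x => x) false
  have hpair := PySem.List.sorted_pairwise var (fun x => x)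
  rw [runScan_sorted (PySem.List.sorted var (fun x => x) false).length _ le_rfl hpair 0 0 0]
  have hcnt : ∀ y, List.count y (PySem.List.sorted var (fun x => x) false) = List.count y var :=
    fun y => hperm.count_eq y
  have hP1 : List.countP (fun i => List.count i (PySem.List.sorted var (fun x => x) false) == 1)
        (PySem.List.sorted var (fun x => x) false)
      = List.countP (fun i => List.count i var == 1) var := by
    rw [List.countP_congr (fun a _ => by rw [hcnt a])]
    exact hperm.countP_eq _
  have hP2 : List.countP (fun i => !(List.count i (PySem.List.sorted var (fun x => x) false) == 1))
        (PySem.List.sorted var (fun x => x) false)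
      = List.countP (fun i => !(List.count i var == 1)) var := by
    rw [List.countP_congr (fun a _ => by rw [hcnt a])]
    exact hperm.countP_eq _
  rw [hP1, hP2, hcnt]
  by_cases hmem : "empty:''" ∈ var
  · rw [if_pos (hperm.mem_iff.mpr hmem)]
    simp
  · rw [if_neg (fun h => hmem (hperm.mem_iff.mp h))]
    rw [List.count_eq_zero.mpr hmem]
    simp

-- ===== VERDICT (by name: the statement is the Claim_ definition above) =====
theorem contRepetidos_spec : Claim_equal_contRepetidos := by
  intro var _
  show contRepetidos var = contRepetidos_alt var
  rw [A_counts, B_counts]
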